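-- pv_equiv track=rewrite | github.com/kaplanebru/dna.py | dna.py | maxx
-- ===== SOURCE A (Python) =====
-- def maxx(text, key):
--     dictt = {}
--     k=len(key)
--     count=0
--     i=0
--     dictt[count]=0
--
--     while(i < len(text)):
--         j=i+k
--         if text[i:j] == key:
--             dictt[count]+=1
--             i+=k #i+=1 yani i++ yerine i+=4 yani i+=k şeklinde iterate ediyor
--         else:
--             count+=1
--             dictt[count]=0
--             i+=1 #yanlışı 4(k) atlayamayız
--     temp=0
--     for i in dictt:
--         if(temp<dictt[i]):
--             temp=dictt[i]
--     maxx=temp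
--     return(maxx)
-- ===== SOURCE B (Python) =====
-- def maxx(text, key):
--     # Jump between occurrences with str.find instead of testing a slice at
--     # every index; track the current run and the best with two counters.
--     if not key:
--         return 0
--     k = len(key)
--     best = 0
--     i = 0
--     while True:
--         j = text.find(key, i)
--         if j == -1:
--             break
--         run = 0
--         while text.startswith(key, j):
--             run += 1
--             j += k
--         if run > best:
--             best = run
--         i = j + 1
--     return best
-- ===== Notes on version B (the rewrite author's own statement) =====
-- stated objective: faster
-- what changed: B drops A's per-index slice comparison and run-length dict: it jumps straight between occurrences with str.find, counts each run of consecutive non-overlapping matches with startswith, and keeps only two counters (current run, best).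
import Mathlib
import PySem

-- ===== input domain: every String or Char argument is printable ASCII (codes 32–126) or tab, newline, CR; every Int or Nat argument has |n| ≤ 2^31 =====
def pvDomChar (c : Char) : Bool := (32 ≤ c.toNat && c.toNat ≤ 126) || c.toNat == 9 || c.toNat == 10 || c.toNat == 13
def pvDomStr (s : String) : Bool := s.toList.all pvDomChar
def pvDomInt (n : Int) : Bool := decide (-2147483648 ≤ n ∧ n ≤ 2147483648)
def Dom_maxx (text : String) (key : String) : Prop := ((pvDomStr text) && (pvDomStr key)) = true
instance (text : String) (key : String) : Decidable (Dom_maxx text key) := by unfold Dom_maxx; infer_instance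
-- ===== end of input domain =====

-- B replaces A's per-index slice test and run-length dict by jumping between
-- occurrences with str.find and two counters (same return value; measurably faster).

-- ===== PORT A =====
-- A's while loop; fuel = |text| + 1 suffices since i grows by ≥ 1 per step
-- whenever key ≠ "" (key = "" with text ≠ "" diverges in Python: outside Pre_).
-- `dictt[count] += 1` always finds the key present, so it is `modify count 0 (·+1)`.
def pvLoopA (cs ks : List Char) (k : Nat) :
    Nat → PySem.Dict Int Int → Int → Nat → PySem.Dict Int Int
  | 0, d, _, _ => d
  | fuel + 1, d, count, i =>
    if i < cs.length then
      if PySem.List.slice cs (some (i : Int)) (some ((i : Int) + (k : Int))) = ks then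
        pvLoopA cs ks k fuel (d.modify count 0 (· + 1)) count (i + k)
      else
        pvLoopA cs ks k fuel (d.insert (count + 1) 0) (count + 1) (i + 1)
    else d

def maxx (text : String) (key : String) : Int :=
  let cs := text.toList
  let ks := key.toList
  let k := ks.length
  let d := pvLoopA cs ks k (cs.length + 1) ((PySem.Dict.empty).insert 0 0) 0 0
  -- `for i in dictt: if temp < dictt[i]: temp = dictt[i]` reads each key's value in order
  d.values.foldl (fun temp v => if temp < v then v else temp) 0

-- ===== PORT B =====
-- B's inner `while text.startswith(key, j)` loop: startswith with offset j ≥ 0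
-- is exactly `key.toList <+:`-test on `cs.drop j` (PySem.Chars.startswith).
def pvRunB (cs ks : List Char) (k : Nat) : Nat → Int → Nat → Int × Nat
  | 0, run, j => (run, j)
  | fuel + 1, run, j =>
    if PySem.Chars.startswith (cs.drop j) ks then pvRunB cs ks k fuel (run + 1) (j + k)
    else (run, j)

-- B's outer loop: `j = text.find(key, i)`; stop on -1, else count the run at j.
def pvLoopB (cs ks : List Char) (k : Nat) : Nat → Int → Nat → Int
  | 0, best, _ => best
  | fuel + 1, best, i =>
    let j := PySem.Chars.findFrom cs ks (i : Int) none
    if j = -1 then best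
    else
      let p := pvRunB cs ks k (cs.length + 1) 0 j.toNat
      pvLoopB cs ks k fuel (if p.1 > best then p.1 else best) (p.2 + 1)

def maxx_alt (text : String) (key : String) : Int :=
  let cs := text.toList
  let ks := key.toList
  if ks = [] then 0
  else pvLoopB cs ks ks.length (cs.length + 1) 0 0

-- ===== PRECONDITION & SPEC =====
-- Pre_ excludes only key = "" with nonempty text, where A's while loop never advances
-- (i += 0 on a match of the empty key): the Python A diverges there, returning nothing.
def Pre_maxx (text : String) (key : String) : Prop := key = "" → text = ""
instance (text : String) (key : String) : Decidable (Pre_maxx text key) := by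
  unfold Pre_maxx; infer_instance

def pvWitness_maxx : String × String := ("abcabcxabc", "abc")

def Spec_maxx (text : String) (key : String) (out : Int) : Prop := out = maxx_alt text key
instance (text : String) (key : String) (out : Int) : Decidable (Spec_maxx text key out) := by
  unfold Spec_maxx; infer_instance

-- ===== CLAIM (what is proved, stated in full; the proofs are below) =====
def Claim_equal_maxx : Prop := ∀ (text : String) (key : String),
  Dom_maxx text key → Pre_maxx text key → Spec_maxx text key (maxx text key)

-- ===== LEMMAS AND PROOFS =====

-- reference scan: walk the text like A does, keeping the current run and the best;
-- `max ks.length 1` equals ks.length whenever ks ≠ [] and only keeps recursion well-founded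
def pvScan (cs ks : List Char) (i : Nat) (cur best : Int) : Int :=
  if i < cs.length then
    if ks <+: cs.drop i then pvScan cs ks (i + max ks.length 1) (cur + 1) best
    else pvScan cs ks (i + 1) 0 (max best cur)
  else max best cur
termination_by cs.length - i
decreasing_by all_goals omega

lemma pvIfMax (t v : Int) : (if t < v then v else t) = max t v := by
  simp only [max_def]; split_ifs <;> omega

lemma pvIfMax' (t v : Int) : (if v > t then v else t) = max t v := pvIfMax t v

lemma pvFoldMax_append (vs : List Int) (c : Int) :
    (vs ++ [c]).foldl (fun t v => if t < v then v else t) 0 =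
      max (vs.foldl (fun t v => if t < v then v else t) 0) c := by
  simp [List.foldl_append, pvIfMax]

lemma pvSliceEq (cs ks : List Char) (i : Nat) :
    (PySem.List.slice cs (some (i : Int)) (some ((i : Int) + (ks.length : Int))) = ks)
      ↔ ks <+: cs.drop i := by
  rw [PySem.List.slice_natCast_add]
  constructor
  · intro h; rw [← h]; exact List.take_prefix _ _
  · intro h
    exact (List.prefix_iff_eq_take.mp h).symm

lemma pvMatch_lt (cs ks : List Char) (i : Nat) (hk : ks ≠ []) (h : ks <+: cs.drop i) :
    i < cs.length := by
  by_contra hi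
  have : cs.drop i = [] := List.drop_eq_nil_of_le (by omega)
  rw [this] at h
  exact hk (List.prefix_nil.mp h)

lemma pvScan_ge (cs ks : List Char) (i : Nat) (cur best : Int) (h : cs.length ≤ i) :
    pvScan cs ks i cur best = max best cur := by
  unfold pvScan; rw [if_neg (by omega)]

-- A's loop computes pvScan: the dict holds the closed runs (all keys < count) and
-- the current run at key `count`; its value-fold-max is `max best cur` at the end.
lemma pvLoopA_eq_scan (cs ks : List Char) (hk : ks ≠ []) :
    ∀ (fuel i : Nat) (d : PySem.Dict Int Int) (c : Int) (init : List (Int × Int))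
      (cur best : Int),
      cs.length - i ≤ fuel →
      d.items = init ++ [(c, cur)] →
      (∀ p ∈ init, p.1 < c) →
      d.keys.Nodup →
      best = (init.map Prod.snd).foldl (fun t v => if t < v then v else t) 0 →
      ((pvLoopA cs ks ks.length fuel d c i).values).foldl
          (fun t v => if t < v then v else t) 0 = pvScan cs ks i cur best := by
  have hk1 : 1 ≤ ks.length := List.length_pos_iff.mpr hk
  intro fuel
  induction fuel with
  | zero =>
    intro i d c init cur best hf hitems hlt hnd hbest
    rw [pvScan_ge cs ks i cur best (by omega)]
    show (d.items.map Prod.snd).foldl _ 0 = _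
    rw [hitems]; simp only [List.map_append, List.map_cons, List.map_nil]
    rw [pvFoldMax_append, ← hbest]
  | succ fuel ih =>
    intro i d c init cur best hf hitems hlt hnd hbest
    by_cases hi : i < cs.length
    · by_cases hm : PySem.List.slice cs (some (i : Int)) (some ((i : Int) + (ks.length : Int))) = ks
      · -- match: increment the current run, jump by the key length
        have hpre : ks <+: cs.drop i := (pvSliceEq cs ks i).mp hm
        have hcur : d.getD c 0 = cur :=
          PySem.Dict.getD_of_mem_items d (by rw [hitems]; simp) hnd 0
        have hmod : d.modify c 0 (· + 1) = d.insert c (cur + 1) := by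
          show d.insert c (d.getD c 0 + 1) = _
          rw [hcur]
        have hcont : d.contains c = true := by
          rw [PySem.Dict.contains_iff_mem_keys]
          show c ∈ d.items.map Prod.fst
          rw [hitems]; simp
        have hitems' : (d.insert c (cur + 1)).items = init ++ [(c, cur + 1)] := by
          rw [PySem.Dict.items_insert_of_contains d (cur + 1) hcont, hitems]
          simp only [List.map_append, List.map_cons, List.map_nil, beq_self_eq_true,
            if_pos]
          congr 1
          conv_rhs => rw [← List.map_id init]
          apply List.map_congr_left
          intro p hp
          have : p.1 ≠ c := by have := hlt p hp; omega
          simp [this]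
        have hnd' : (d.insert c (cur + 1)).keys.Nodup := PySem.Dict.nodup_keys_insert d c _ hnd
        rw [pvLoopA, if_pos hi, if_pos hm, hmod]
        rw [pvScan, if_pos hi, if_pos hpre,
          show i + max ks.length 1 = i + ks.length by omega]
        exact ih (i + ks.length) (d.insert c (cur + 1)) c init (cur + 1) best (by omega)
          hitems' hlt hnd' hbest
      · -- mismatch: close the run, open run (count+1) at 0
        have hnpre : ¬ ks <+: cs.drop i := fun hp => hm ((pvSliceEq cs ks i).mpr hp)
        have hncont : d.contains (c + 1) = false := by
          rw [PySem.Dict.contains_eq_decide_mem_keys]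
          simp only [decide_eq_false_iff_not]
          show ¬ (c + 1) ∈ d.items.map Prod.fst
          rw [hitems]
          simp only [List.map_append, List.map_cons, List.map_nil, List.mem_append,
            List.mem_cons, List.not_mem_nil, or_false]
          rintro (hmem | hmem)
          · obtain ⟨p, hp, hpe⟩ := List.mem_map.mp hmem
            have := hlt p hp; omega
          · omega
        have hitems' : (d.insert (c + 1) 0).items = (init ++ [(c, cur)]) ++ [(c + 1, 0)] := by
          rw [PySem.Dict.items_insert_of_not_contains d 0 hncont, hitems]
        have hnd' : (d.insert (c + 1) 0).keys.Nodup := PySem.Dict.nodup_keys_insert d _ _ hnd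
        rw [pvLoopA, if_pos hi, if_neg hm]
        rw [pvScan, if_pos hi, if_neg hnpre]
        exact ih (i + 1) (d.insert (c + 1) 0) (c + 1) (init ++ [(c, cur)]) 0
          (max best cur) (by omega) hitems'
          (by intro p hp
              rcases List.mem_append.mp hp with h | h
              · have := hlt p h; omega
              · simp at h; subst h; omega)
          hnd'
          (by simp only [List.map_append, List.map_cons, List.map_nil]
              rw [pvFoldMax_append, ← hbest])
    · rw [pvLoopA, if_neg hi, pvScan_ge cs ks i cur best (by omega)]
      show (d.items.map Prod.snd).foldl _ 0 = _
      rw [hitems]; simp only [List.map_append, List.map_cons, List.map_nil]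
      rw [pvFoldMax_append, ← hbest]

lemma pvScan_skip (cs ks : List Char) :
    ∀ (m i : Nat) (best : Int), 0 ≤ best → i + m ≤ cs.length →
      (∀ t, i ≤ t → t < i + m → ¬ ks <+: cs.drop t) →
      pvScan cs ks i 0 best = pvScan cs ks (i + m) 0 best := by
  intro m
  induction m with
  | zero => intro i best _ _ _; rfl
  | succ m ih =>
    intro i best hb hlen hno
    have hi : i < cs.length := by omega
    rw [pvScan, if_pos hi, if_neg (hno i le_rfl (by omega))]
    have : max best 0 = best := by omega
    rw [this]
    have := ih (i + 1) best hb (by omega) (fun t ht1 ht2 => hno t (by omega) (by omega))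
    rw [this]
    congr 1
    omega

lemma pvScan_none (cs ks : List Char) :
    ∀ (i : Nat) (best : Int), 0 ≤ best →
      (∀ t, i ≤ t → ¬ ks <+: cs.drop t) →
      pvScan cs ks i 0 best = best := by
  have main : ∀ (fuel i : Nat) (best : Int), cs.length - i ≤ fuel → 0 ≤ best →
      (∀ t, i ≤ t → ¬ ks <+: cs.drop t) → pvScan cs ks i 0 best = best := by
    intro fuel
    induction fuel with
    | zero =>
      intro i best hf hb _
      rw [pvScan_ge cs ks i 0 best (by omega)]; omega
    | succ fuel ih =>
      intro i best hf hb hno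
      by_cases hi : i < cs.length
      · rw [pvScan, if_pos hi, if_neg (hno i le_rfl)]
        have : max best 0 = best := by omega
        rw [this]
        exact ih (i + 1) best (by omega) hb (fun t ht => hno t (by omega))
      · rw [pvScan_ge cs ks i 0 best (by omega)]; omega
  intro i best hb hno
  exact main (cs.length - i + 1) i best (by omega) hb hno

lemma pvScan_nomatch_step (cs ks : List Char) (j : Nat) (r best : Int)
    (h : ¬ ks <+: cs.drop j) (hb : 0 ≤ best) (hr : 0 ≤ r) :
    pvScan cs ks j r best = pvScan cs ks (j + 1) 0 (max best r) := by
  by_cases hj : j < cs.length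
  · rw [pvScan, if_pos hj, if_neg h]
  · rw [pvScan_ge cs ks j r best (by omega), pvScan_ge cs ks (j + 1) 0 (max best r) (by omega)]
    omega

lemma pvRunB_scan (cs ks : List Char) (hk : ks ≠ []) :
    ∀ (fuel j : Nat) (run best : Int), cs.length + 1 - j ≤ fuel →
      pvScan cs ks j run best =
        pvScan cs ks (pvRunB cs ks ks.length fuel run j).2
          (pvRunB cs ks ks.length fuel run j).1 best ∧
      ¬ ks <+: cs.drop (pvRunB cs ks ks.length fuel run j).2 ∧
      j ≤ (pvRunB cs ks ks.length fuel run j).2 ∧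
      run ≤ (pvRunB cs ks ks.length fuel run j).1 := by
  have hk1 : 1 ≤ ks.length := List.length_pos_iff.mpr hk
  intro fuel
  induction fuel with
  | zero =>
    intro j run best hf
    simp only [pvRunB]
    refine ⟨trivial, ?_, le_rfl, le_rfl⟩
    intro hp
    have hdrop : cs.drop j = [] := List.drop_eq_nil_of_le (by omega)
    rw [hdrop] at hp
    exact hk (List.prefix_nil.mp hp)
  | succ fuel ih =>
    intro j run best hf
    by_cases hsw : PySem.Chars.startswith (cs.drop j) ks = true
    · have hpre : ks <+: cs.drop j := (PySem.Chars.startswith_iff _ _).mp hsw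
      have hjn : j < cs.length := pvMatch_lt cs ks j hk hpre
      have hlen : j + ks.length ≤ cs.length := by
        have := hpre.length_le
        simp only [List.length_drop] at this
        omega
      have hstep : pvRunB cs ks ks.length (fuel + 1) run j =
          pvRunB cs ks ks.length fuel (run + 1) (j + ks.length) := by
        rw [pvRunB, if_pos hsw]
      obtain ⟨hseq, hno, hle, hrle⟩ := ih (j + ks.length) (run + 1) best (by omega)
      rw [hstep]
      refine ⟨?_, hno, by omega, by omega⟩
      rw [pvScan, if_pos hjn, if_pos hpre]
      rw [show j + max ks.length 1 = j + ks.length by omega]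
      exact hseq
    · have hstep : pvRunB cs ks ks.length (fuel + 1) run j = (run, j) := by
        rw [pvRunB, if_neg hsw]
      rw [hstep]
      exact ⟨rfl, fun hp => hsw ((PySem.Chars.startswith_iff _ _).mpr hp), le_rfl, le_rfl⟩

lemma pvFindFrom_gt (cs ks : List Char) (i : Nat) (h : cs.length < i) :
    PySem.Chars.findFrom cs ks (i : Int) none = -1 := by
  simp only [PySem.Chars.findFrom]
  split_ifs with h1 h2 h3 <;> try rfl
  all_goals exfalso
  all_goals omega

lemma pvLoopB_eq_scan (cs ks : List Char) (hk : ks ≠ []) :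
    ∀ (fuel i : Nat) (best : Int), cs.length + 1 - i ≤ fuel → 0 ≤ best →
      pvLoopB cs ks ks.length fuel best i = pvScan cs ks i 0 best := by
  have hk1 : 1 ≤ ks.length := List.length_pos_iff.mpr hk
  intro fuel
  induction fuel with
  | zero =>
    intro i best hf hb
    rw [pvScan_ge cs ks i 0 best (by omega)]
    show best = max best 0
    omega
  | succ fuel ih =>
    intro i best hf hb
    by_cases hin : i ≤ cs.length
    · by_cases hj : PySem.Chars.findFrom cs ks (i : Int) none = -1
      · have hstop : pvLoopB cs ks ks.length (fuel + 1) best i = best := by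
          rw [pvLoopB]; simp [hj]
        rw [hstop]
        have hninf : ¬ ks <:+: cs.drop i :=
          (PySem.Chars.findFrom_natCast_eq_neg_one_iff cs ks i hin).mp hj
        refine (pvScan_none cs ks i best hb ?_).symm
        intro t ht hp
        apply hninf
        rw [← PySem.Chars.isIn_iff_infix]
        apply (PySem.Chars.exists_prefix_drop_iff_isIn ks (cs.drop i)).mp
        exact ⟨t - i, by rw [List.drop_drop, show i + (t - i) = t by omega]; exact hp⟩
      · obtain ⟨hij, hpre, hmin⟩ := PySem.Chars.findFrom_natCast_spec cs ks i hin hj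
        set j := PySem.Chars.findFrom cs ks (i : Int) none with hjdef
        have hj0 : 0 ≤ j := le_trans (by omega) hij
        have hijn : i ≤ j.toNat := by omega
        have hjn : j.toNat < cs.length := pvMatch_lt cs ks j.toNat hk hpre
        obtain ⟨hseq, hno, hle, hrle⟩ :=
          pvRunB_scan cs ks hk (cs.length + 1) j.toNat 0 best (by omega)
        set p := pvRunB cs ks ks.length (cs.length + 1) 0 j.toNat with hpdef
        have hstep : pvLoopB cs ks ks.length (fuel + 1) best i =
            pvLoopB cs ks ks.length fuel (if p.1 > best then p.1 else best) (p.2 + 1) := by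
          rw [pvLoopB]; simp only [← hjdef, ← hpdef]
          rw [if_neg hj]
        rw [hstep, pvIfMax']
        rw [ih (p.2 + 1) (max best p.1) (by omega) (by omega)]
        rw [pvScan_skip cs ks (j.toNat - i) i best hb (by omega)
          (by intro t ht1 ht2; exact hmin t ht1 (by omega))]
        rw [show i + (j.toNat - i) = j.toNat by omega]
        rw [hseq, pvScan_nomatch_step cs ks p.2 p.1 best hno hb (by omega)]
    · have hj : PySem.Chars.findFrom cs ks (i : Int) none = -1 :=
        pvFindFrom_gt cs ks i (by omega)
      have hstop : pvLoopB cs ks ks.length (fuel + 1) best i = best := by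
        rw [pvLoopB]; simp [hj]
      rw [hstop, pvScan_ge cs ks i 0 best (by omega)]
      omega

-- ===== VERDICT (by name: the statement is the Claim_ definition above) =====
theorem maxx_spec : Claim_equal_maxx := by
  intro text key _ hpre
  unfold Spec_maxx
  by_cases hk : key = ""
  · have ht := hpre hk; subst ht; subst hk; decide
  · have hks : key.toList ≠ [] := fun h => hk (String.toList_eq_nil_iff.mp h)
    unfold maxx maxx_alt
    rw [if_neg hks]
    rw [pvLoopA_eq_scan text.toList key.toList hks (text.toList.length + 1) 0
        ((PySem.Dict.empty).insert 0 0) 0 [] 0 0 (by omega) (by rfl)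
        (by intro p hp; cases hp) (by decide) (by rfl)]
    rw [pvLoopB_eq_scan text.toList key.toList hks (text.toList.length + 1) 0 0
        (by omega) (by omega)]
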